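-- pv_equiv track=rewrite | github.com/Pradeepmate02/Data_structure_laboratory-DSL-_Practicals | GroupA_practical2.py | high_low_score
-- ===== SOURCE A (Python) =====
-- def high_low_score(scores):
--     high = None
--     low = None
--     for s in scores:
--         if s != -1:
--             if high is None or s > high:
--                 high = s
--             if low is None or s < low:
--                 low = s
--     return high, low
-- ===== SOURCE B (Python) =====
-- def high_low_score(scores):
--     vals = [s for s in scores if s != -1]
--     if not vals:
--         return None, None
--     return max(vals), min(vals)
-- ===== Notes on version B (the rewrite author's own statement) =====
-- stated objective: simpler
-- what changed: Replaces A's single fused loop tracking high and low simultaneously with a filter comprehension followed by two independent library scans (max and min).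
import Mathlib
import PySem

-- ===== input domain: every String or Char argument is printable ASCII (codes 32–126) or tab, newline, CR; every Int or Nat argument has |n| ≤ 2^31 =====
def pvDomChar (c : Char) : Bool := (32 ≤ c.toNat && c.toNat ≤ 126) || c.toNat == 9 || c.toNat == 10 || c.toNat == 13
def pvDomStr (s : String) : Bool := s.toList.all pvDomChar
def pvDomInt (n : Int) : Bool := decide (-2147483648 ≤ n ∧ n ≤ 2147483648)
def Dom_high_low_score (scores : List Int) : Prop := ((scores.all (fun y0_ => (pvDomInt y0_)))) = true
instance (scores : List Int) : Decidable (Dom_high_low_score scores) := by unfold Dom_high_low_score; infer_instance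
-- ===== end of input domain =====

-- B replaces A's fused high/low tracking loop with filter-then-max/min (objective: simpler).


-- ===== PORT A =====
def hlsStep (st : Option Int × Option Int) (s : Int) : Option Int × Option Int :=
  if s ≠ -1 then
    ((match st.1 with | none => some s | some h => if s > h then some s else some h),
     (match st.2 with | none => some s | some l => if s < l then some s else some l))
  else st

def high_low_score (scores : List Int) : Option Int × Option Int :=
  scores.foldl hlsStep (none, none)

-- ===== PORT B =====
-- builtin max/min on a nonempty list = the running fold (PySem: max?_id_cons)
def high_low_score_alt (scores : List Int) : Option Int × Option Int :=
  match scores.filter (fun s => s ≠ -1) with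
  | [] => (none, none)
  | x :: t => (some (t.foldl max x), some (t.foldl min x))

-- ===== PRECONDITION & SPEC =====
def Spec_high_low_score (scores : List Int) (out : Option Int × Option Int) : Prop := out = high_low_score_alt scores
instance (scores : List Int) (out : Option Int × Option Int) : Decidable (Spec_high_low_score scores out) := by unfold Spec_high_low_score; infer_instance

-- ===== CLAIM (what is proved, stated in full; the proofs are below) =====
def Claim_equal_high_low_score : Prop := ∀ (scores : List Int), Dom_high_low_score scores → Spec_high_low_score scores (high_low_score scores)

-- ===== LEMMAS AND PROOFS =====
theorem hlsStep_some (h l s : Int) :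
    hlsStep (some h, some l) s =
      if s ≠ -1 then (some (max h s), some (min l s)) else (some h, some l) := by
  simp only [hlsStep]
  split_ifs <;> simp_all [Prod.ext_iff] <;> omega

theorem hls_foldl_some (xs : List Int) : ∀ (h l : Int),
    xs.foldl hlsStep (some h, some l) =
      (some ((xs.filter (fun s => s ≠ -1)).foldl max h),
       some ((xs.filter (fun s => s ≠ -1)).foldl min l)) := by
  induction xs with
  | nil => intro h l; simp
  | cons x t ih =>
    intro h l
    by_cases hx : x ≠ -1
    · simp [List.foldl_cons, hlsStep_some, hx, ih]
    · simp only [ne_eq, not_not] at hx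
      subst hx
      simp [List.foldl_cons, hlsStep_some, ih]

theorem hls_foldl_none (xs : List Int) :
    xs.foldl hlsStep (none, none) =
      match xs.filter (fun s => s ≠ -1) with
      | [] => (none, none)
      | x :: t => (some (t.foldl max x), some (t.foldl min x)) := by
  induction xs with
  | nil => simp
  | cons x t ih =>
    by_cases hx : x ≠ -1
    · have : hlsStep (none, none) x = (some x, some x) := by simp [hlsStep, hx]
      simp [List.foldl_cons, this, hx, hls_foldl_some]
    · simp only [ne_eq, not_not] at hx
      subst hx
      have : hlsStep ((none : Option Int), (none : Option Int)) (-1) = (none, none) := by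
        simp [hlsStep]
      simp [List.foldl_cons, this, ih]

-- ===== VERDICT (by name: the statement is the Claim_ definition above) =====
theorem high_low_score_spec : Claim_equal_high_low_score := by
  intro scores _
  unfold Spec_high_low_score high_low_score high_low_score_alt
  exact hls_foldl_none scores
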